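-- pv_equiv track=rewrite | github.com/Tsury/ha-tsuryphone-new | custom_components/tsuryphone/dialing.py | _strip_formatting
-- ===== SOURCE A (Python) =====
-- _FORMATTING_CHARS = {" ", "-", "(", ")", ".", "\t", "\r", "\n"}
--
-- def _strip_formatting(value: str) -> str:
--     """Remove formatting characters while preserving a leading plus and digits."""
--     result: list[str] = []
--     for index, char in enumerate(value):
--         if char in _FORMATTING_CHARS:
--             continue
--         if char == "+":
--             if not result:
--                 result.append(char)
--             continue
--         if char.isdigit():
--             result.append(char)
--     return "".join(result)
-- ===== SOURCE B (Python) =====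
-- def _strip_formatting(value: str) -> str:
--     """Remove formatting characters while preserving a leading plus and digits."""
--     digits = ''.join(c for c in value if c.isdigit())
--     for c in value:
--         if c == '+':
--             return '+' + digits
--         if c.isdigit():
--             return digits
--     return digits
-- ===== Notes on version B (the rewrite author's own statement) =====
-- stated objective: simpler
-- what changed: B drops the accumulator loop and the _FORMATTING_CHARS set: it collects the digits with one filter and decides the leading plus sign by a separate scan for the first plus-or-digit character.
import Mathlib
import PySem

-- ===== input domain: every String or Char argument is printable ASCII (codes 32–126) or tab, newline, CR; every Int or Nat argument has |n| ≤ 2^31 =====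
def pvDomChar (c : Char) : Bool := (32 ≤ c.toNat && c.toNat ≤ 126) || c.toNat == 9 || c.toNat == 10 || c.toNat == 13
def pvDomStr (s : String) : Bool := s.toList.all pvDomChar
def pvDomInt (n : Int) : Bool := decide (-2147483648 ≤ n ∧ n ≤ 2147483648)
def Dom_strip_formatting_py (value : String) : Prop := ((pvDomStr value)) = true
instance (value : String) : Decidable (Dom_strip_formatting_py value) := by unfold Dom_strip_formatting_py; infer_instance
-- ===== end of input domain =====

-- B drops A's accumulator loop: digits are collected by one filter, the leading '+' is decided by a
-- separate scan for the first '+'-or-digit character. Equivalence proved on all of Dom (A is total).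

-- ===== PORT A =====
-- A's loop: for char in value, skip formatting chars, keep '+' only into an empty result, keep digits.
def pvStripLoopA (result : List Char) (cs : List Char) : List Char :=
  match cs with
  | [] => result
  | c :: rest =>
    if c = ' ' ∨ c = '-' ∨ c = '(' ∨ c = ')' ∨ c = '.' ∨ c = '\t' ∨ c = '\r' ∨ c = '\n' then
      pvStripLoopA result rest
    else if c = '+' then
      (if result = [] then pvStripLoopA (result ++ [c]) rest else pvStripLoopA result rest)
    else if c.isDigit then
      pvStripLoopA (result ++ [c]) rest
    else
      pvStripLoopA result rest

def strip_formatting_py (value : String) : String :=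
  String.mk (pvStripLoopA [] value.toList)

-- ===== PORT B =====
-- B's scan: first '+' found before any digit makes the prefix "+"; a digit first (or nothing) gives "".
def pvPlusScanB (digits : List Char) (cs : List Char) : List Char :=
  match cs with
  | [] => digits
  | c :: rest =>
    if c = '+' then '+' :: digits
    else if c.isDigit then digits
    else pvPlusScanB digits rest

def strip_formatting_py_alt (value : String) : String :=
  String.mk (pvPlusScanB (value.toList.filter Char.isDigit) value.toList)

-- ===== PRECONDITION & SPEC =====
def Spec_strip_formatting_py (value : String) (out : String) : Prop := out = strip_formatting_py_alt value
instance (value : String) (out : String) : Decidable (Spec_strip_formatting_py value out) := by unfold Spec_strip_formatting_py; infer_instance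

-- ===== CLAIM (what is proved, stated in full; the proofs are below) =====
def Claim_equal_strip_formatting_py : Prop := ∀ (value : String), Dom_strip_formatting_py value → Spec_strip_formatting_py value (strip_formatting_py value)

-- ===== LEMMAS AND PROOFS =====

-- Once A's accumulator is nonempty, the loop just appends the remaining digits.
theorem pvStripLoopA_nonempty (cs : List Char) (r : List Char) (h : r ≠ []) :
    pvStripLoopA r cs = r ++ cs.filter Char.isDigit := by
  induction cs generalizing r with
  | nil => simp [pvStripLoopA]
  | cons c rest ih =>
    by_cases hf : c = ' ' ∨ c = '-' ∨ c = '(' ∨ c = ')' ∨ c = '.' ∨ c = '\t' ∨ c = '\r' ∨ c = '\n'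
    · have hd : c.isDigit = false := by rcases hf with h|h|h|h|h|h|h|h <;> subst h <;> decide
      simp [pvStripLoopA, hf, ih r h, List.filter, hd]
    · by_cases hp : c = '+'
      · subst hp
        have : r = [] ↔ False := by simp [h]
        simp [pvStripLoopA, hf, h, ih r h, List.filter]
      · by_cases hd : c.isDigit
        · have ih' := ih (r ++ [c]) (by simp)
          simp [pvStripLoopA, hf, hp, hd, ih', List.filter]
        · simp [pvStripLoopA, hf, hp, hd, ih r h, List.filter]

-- A's loop from the empty accumulator equals B's scan with the full digit filter.
theorem pvStripLoopA_empty (cs : List Char) :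
    pvStripLoopA [] cs = pvPlusScanB (cs.filter Char.isDigit) cs := by
  induction cs with
  | nil => simp [pvStripLoopA, pvPlusScanB]
  | cons c rest ih =>
    by_cases hf : c = ' ' ∨ c = '-' ∨ c = '(' ∨ c = ')' ∨ c = '.' ∨ c = '\t' ∨ c = '\r' ∨ c = '\n'
    · have hp : c ≠ '+' := by rcases hf with h|h|h|h|h|h|h|h <;> subst h <;> decide
      have hd : c.isDigit = false := by rcases hf with h|h|h|h|h|h|h|h <;> subst h <;> decide
      simp [pvStripLoopA, pvPlusScanB, hf, hp, hd, ih, List.filter]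
    · by_cases hp : c = '+'
      · subst hp
        rw [show pvStripLoopA [] ('+' :: rest) = pvStripLoopA ['+'] rest by
              simp [pvStripLoopA]]
        rw [pvStripLoopA_nonempty rest ['+'] (by simp)]
        simp [pvPlusScanB, List.filter]
      · by_cases hd : c.isDigit
        · rw [show pvStripLoopA [] (c :: rest) = pvStripLoopA [c] rest by
                simp [pvStripLoopA, hf, hp, hd]]
          rw [pvStripLoopA_nonempty rest [c] (by simp)]
          simp [pvPlusScanB, hp, hd, List.filter]
        · simp [pvStripLoopA, pvPlusScanB, hf, hp, hd, ih, List.filter]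

-- ===== VERDICT (by name: the statement is the Claim_ definition above) =====
theorem strip_formatting_py_spec : Claim_equal_strip_formatting_py := by
  intro value _
  unfold Spec_strip_formatting_py strip_formatting_py strip_formatting_py_alt
  rw [pvStripLoopA_empty]
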